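-- pv_equiv track=rewrite | github.com/skienzmatishun/decode-maybe | diff_analysis.py | kasiski
-- ===== SOURCE A (Python) =====
-- from math import gcd
--
-- def kasiski(encrypted_data, sequence_length=3):
--     """Estimates key length using Kasiski examination"""
--     sequences = {}
--     for i in range(len(encrypted_data) - sequence_length):
--         seq = tuple(encrypted_data[i:i+sequence_length])
--         if seq in sequences:
--             sequences[seq].append(i)
--         else:
--             sequences[seq] = [i]
--     distances = []
--     for indices in sequences.values():
--         if len(indices) >= 2:
--             for j in range(1, len(indices)):
--                 distances.append(indices[j] - indices[0])
--     if not distances: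
--         return None
--     current_gcd = distances[0]
--     for d in distances[1:]:
--         current_gcd = gcd(current_gcd, d)
--         if current_gcd == 1:
--             break
--     return current_gcd
-- ===== SOURCE B (Python) =====
-- from math import gcd
--
-- def kasiski(encrypted_data, sequence_length=3):
--     """Estimates key length using Kasiski examination"""
--     first = {}
--     g = None
--     for i in range(len(encrypted_data) - sequence_length):
--         seq = tuple(encrypted_data[i:i+sequence_length])
--         if seq in first:
--             d = i - first[seq]
--             g = d if g is None else gcd(g, d)
--             if g == 1:
--                 return 1
--         else:
--             first[seq] = i
--     return g
-- ===== Notes on version B (the rewrite author's own statement) =====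
-- stated objective: simpler
-- what changed: Single pass over the windows keeping only each trigram's first index (an int, not a position list) and folding the running gcd on the fly with an early return at gcd 1, instead of A's three phases (position-list dict, distances list, separate gcd loop).
import Mathlib
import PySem

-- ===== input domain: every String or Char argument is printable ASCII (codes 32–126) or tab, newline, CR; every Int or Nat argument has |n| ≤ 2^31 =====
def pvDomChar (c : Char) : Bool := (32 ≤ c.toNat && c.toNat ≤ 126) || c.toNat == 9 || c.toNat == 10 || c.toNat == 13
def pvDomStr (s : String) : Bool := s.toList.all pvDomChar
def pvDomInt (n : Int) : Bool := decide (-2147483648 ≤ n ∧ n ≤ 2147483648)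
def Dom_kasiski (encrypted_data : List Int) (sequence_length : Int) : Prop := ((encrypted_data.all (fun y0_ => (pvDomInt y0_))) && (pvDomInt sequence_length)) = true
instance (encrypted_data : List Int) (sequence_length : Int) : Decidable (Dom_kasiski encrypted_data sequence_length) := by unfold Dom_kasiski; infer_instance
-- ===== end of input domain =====

-- B replaces A's three phases (position-list dict, then distances list, then gcd loop) by one pass
-- that keeps only each window's first index and folds the running gcd on the fly, returning as soon
-- as the gcd reaches 1 (objective: simpler).

-- ===== PORT A =====
-- seq = tuple(encrypted_data[i:i+sequence_length])
def pvKey (encrypted_data : List Int) (sequence_length : Int) (i : Int) : List Int :=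
  PySem.List.slice encrypted_data (some i) (some (i + sequence_length))

-- body of A's first loop: if seq in sequences: sequences[seq].append(i); else: sequences[seq] = [i].
-- Python's in-place append is O(1), so the port accumulates each position list NEWEST-FIRST (cons)
-- and reverses it when it is read below; a literal 'l ++ [i]' per step would be quadratically
-- slower than its Python and the port could not be evaluated.
def pvAStep (encrypted_data : List Int) (sequence_length : Int)
    (d : PySem.Dict (List Int) (List Int)) (i : Int) : PySem.Dict (List Int) (List Int) :=
  match d.get? (pvKey encrypted_data sequence_length i) with
  | some l => d.insert (pvKey encrypted_data sequence_length i) (i :: l)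
  | none   => d.insert (pvKey encrypted_data sequence_length i) [i]

-- body of A's second loop: if len(indices) >= 2: for j in range(1, len(indices)):
-- distances.append(indices[j] - indices[0]).  The stored list is reversed back into Python's
-- 'indices'; the inner loop walks indices[1:] in order (indices[j] for j = 1, 2, …; O(1) per step
-- where pyGetD on a linked list would be O(j)), and 'distances' is likewise accumulated
-- newest-first (Python's O(1) append) and reversed once at the end of the phase.
def pvDistStep (acc : List Int) (stored : List Int) : List Int :=
  let indices := stored.reverse
  if 2 ≤ indices.length then
    indices.tail.foldl (fun a x => (x - indices.headD 0) :: a) acc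
  else acc

-- A's third loop: current_gcd = gcd(current_gcd, d); if current_gcd == 1: break
def pvGcdLoop (g : Int) : List Int → Int
  | [] => g
  | d :: ds =>
    let g' : Int := Int.gcd g d
    if g' = 1 then g' else pvGcdLoop g' ds

def kasiski (encrypted_data : List Int) (sequence_length : Int) : Option Int :=
  let sequences :=
    (PySem.List.pyRange 0 (PySem.List.len encrypted_data - sequence_length) 1).foldl
      (pvAStep encrypted_data sequence_length) PySem.Dict.empty
  let distances := (sequences.values.foldl pvDistStep []).reverse
  match distances with
  | [] => none
  | d0 :: rest => some (pvGcdLoop d0 rest)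

-- ===== PORT B =====
-- B's single loop; the early 'return 1' is the first branch's if
def pvBLoop (encrypted_data : List Int) (sequence_length : Int)
    (first : PySem.Dict (List Int) Int) (g : Option Int) : List Int → Option Int
  | [] => g
  | i :: rest =>
    match first.get? (pvKey encrypted_data sequence_length i) with
    | some f0 =>
      let d := i - f0
      let g' : Int := match g with | none => d | some gg => Int.gcd gg d
      if g' = 1 then some 1 else pvBLoop encrypted_data sequence_length first (some g') rest
    | none => pvBLoop encrypted_data sequence_length
        (first.insert (pvKey encrypted_data sequence_length i) i) g rest

def kasiski_alt (encrypted_data : List Int) (sequence_length : Int) : Option Int :=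
  pvBLoop encrypted_data sequence_length PySem.Dict.empty none
    (PySem.List.pyRange 0 (PySem.List.len encrypted_data - sequence_length) 1)

-- ===== PRECONDITION & SPEC =====
def Spec_kasiski (encrypted_data : List Int) (sequence_length : Int) (out : Option Int) : Prop := out = kasiski_alt encrypted_data sequence_length
instance (encrypted_data : List Int) (sequence_length : Int) (out : Option Int) : Decidable (Spec_kasiski encrypted_data sequence_length out) := by unfold Spec_kasiski; infer_instance

-- ===== CLAIM (what is proved, stated in full; the proofs are below) =====
def Claim_equal_kasiski : Prop := ∀ (encrypted_data : List Int) (sequence_length : Int), Dom_kasiski encrypted_data sequence_length → Spec_kasiski encrypted_data sequence_length (kasiski encrypted_data sequence_length)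

-- ===== LEMMAS AND PROOFS =====

-- one gcd-folding step on the optional accumulator (g = d if g is None else gcd(g, d))
def pvF (g : Option Int) (d : Int) : Option Int :=
  match g with
  | none => some d
  | some gg => some (Int.gcd gg d)

-- the distances a (forward) position list l contributes: [x - l[0] for x in l[1:]]
def pvTD (l : List Int) : List Int := l.tail.map (fun j => j - l.headD 0)

-- the distances B's loop consumes, in stream order
def pvStream (encrypted_data : List Int) (sequence_length : Int)
    (first : PySem.Dict (List Int) Int) : List Int → List Int
  | [] => []
  | i :: rest =>
    match first.get? (pvKey encrypted_data sequence_length i) with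
    | some f0 => (i - f0) :: pvStream encrypted_data sequence_length first rest
    | none => pvStream encrypted_data sequence_length
        (first.insert (pvKey encrypted_data sequence_length i) i) rest

-- A's distances, read off a dict (whose values are reversed position lists) through its keys
def pvDists (d : PySem.Dict (List Int) (List Int)) : List Int :=
  d.keys.flatMap (fun k => pvTD ((d.getD k []).reverse))

theorem pvF_rightComm : ∀ (g : Option Int) (a b : Int), pvF (pvF g a) b = pvF (pvF g b) a := by
  intro g a b
  cases g with
  | none => simp [pvF, Int.gcd_comm]
  | some gg => simp [pvF, Int.gcd]; rw [Nat.gcd_assoc, Nat.gcd_comm a.natAbs, ← Nat.gcd_assoc]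

theorem pvFoldGcd_one (ds : List Int) : ds.foldl (fun a d => (Int.gcd a d : Int)) 1 = 1 := by
  induction ds with
  | nil => rfl
  | cons d ds ih =>
    have : (Int.gcd 1 d : Int) = 1 := by simp [Int.gcd]
    simp only [List.foldl_cons, this, ih]

theorem pvGcdLoop_eq_foldl (ds : List Int) : ∀ (g : Int),
    pvGcdLoop g ds = ds.foldl (fun a d => (Int.gcd a d : Int)) g := by
  induction ds with
  | nil => intro g; rfl
  | cons d ds ih =>
    intro g
    simp only [pvGcdLoop, List.foldl_cons]
    by_cases h : (Int.gcd g d : Int) = 1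
    · simp [h, pvFoldGcd_one]
    · simp [h, ih]

theorem pvFoldF_some (ds : List Int) : ∀ (g : Int),
    ds.foldl pvF (some g) = some (ds.foldl (fun a d => (Int.gcd a d : Int)) g) := by
  induction ds with
  | nil => intro g; rfl
  | cons d ds ih => intro g; simp [pvF, ih]

theorem pvFoldF_one (l : List Int) : l.foldl pvF (some 1) = some 1 := by
  induction l with
  | nil => rfl
  | cons d ds ih =>
    have : pvF (some 1) d = some 1 := by simp [pvF, Int.gcd]
    simp only [List.foldl_cons, this, ih]

-- B's loop with its early return is the plain pvF-fold over the stream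
theorem pvBLoop_eq_foldl (encrypted_data : List Int) (sequence_length : Int) :
    ∀ (is : List Int) (first : PySem.Dict (List Int) Int) (g : Option Int),
    pvBLoop encrypted_data sequence_length first g is =
      (pvStream encrypted_data sequence_length first is).foldl pvF g := by
  intro is
  induction is with
  | nil => intro first g; rfl
  | cons i rest ih =>
    intro first g
    rw [pvBLoop, pvStream]
    cases hf : first.get? (pvKey encrypted_data sequence_length i) with
    | none => exact ih _ g
    | some f0 =>
      simp only [List.foldl_cons]
      have hfg : pvF g (i - f0) = some (match g with | none => i - f0 | some gg => (Int.gcd gg (i - f0) : Int)) := by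
        cases g <;> rfl
      by_cases h1 : (match g with | none => i - f0 | some gg => (Int.gcd gg (i - f0) : Int)) = 1
      · rw [if_pos h1, hfg, h1, pvFoldF_one]
      · simp only [if_neg h1]
        rw [ih, hfg]

-- a cons-accumulating loop is the reversed map in front of the accumulator
theorem pvFoldConsMap (f : Int → Int) (l : List Int) : ∀ (acc : List Int),
    l.foldl (fun a x => f x :: a) acc = (l.map f).reverse ++ acc := by
  induction l with
  | nil => intro acc; simp
  | cons x t ih => intro acc; simp [ih]

-- folding reversed blocks in front of the accumulator reverses the concatenation
theorem pvFoldRevFlat (g : List Int → List Int) (keys : List (List Int)) : ∀ (acc : List Int),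
    keys.foldl (fun acc k => (g k).reverse ++ acc) acc = (keys.flatMap g).reverse ++ acc := by
  induction keys with
  | nil => intro acc; simp
  | cons h t ih => intro acc; simp [ih]

-- A's inner loop for one stored (reversed) position list prepends its reversed tail-distances
theorem pvDistStep_eq (acc : List Int) (stored : List Int) :
    pvDistStep acc stored = (pvTD stored.reverse).reverse ++ acc := by
  rw [pvDistStep]
  cases hrev : stored.reverse with
  | nil => simp [pvTD]
  | cons h t =>
    cases t with
    | nil => simp [pvTD]
    | cons x t' =>
      rw [if_pos (by simp)]
      simp only [List.tail_cons, List.headD_cons]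
      rw [pvFoldConsMap (fun y => y - h) (x :: t') acc]
      simp [pvTD]

-- A's whole second phase computes the reversed distances of the final dict
theorem pvDistPhase (d : PySem.Dict (List Int) (List Int)) (hnd : d.keys.Nodup) :
    d.values.foldl pvDistStep [] = (pvDists d).reverse := by
  rw [PySem.Dict.values_eq_map_keys d hnd []]
  rw [List.foldl_map]
  have : ∀ (acc : List Int), ∀ k ∈ d.keys,
      pvDistStep acc (d.getD k []) = (pvTD ((d.getD k []).reverse)).reverse ++ acc := by
    intro acc k _; exact pvDistStep_eq acc _
  rw [PySem.List.foldl_congr_mem d.keys _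
    (fun acc k => (pvTD ((d.getD k []).reverse)).reverse ++ acc) [] this]
  rw [pvFoldRevFlat (fun k => pvTD ((d.getD k []).reverse)) d.keys []]
  simp [pvDists]

theorem pvTD_append (l : List Int) (i : Int) (hl : l ≠ []) :
    pvTD (l ++ [i]) = pvTD l ++ [i - l.headD 0] := by
  obtain ⟨h, t, rfl⟩ := List.exists_cons_of_ne_nil hl
  simp [pvTD]

theorem pvHeadD_append (l : List Int) (i : Int) (hl : l ≠ []) :
    (l ++ [i]).headD 0 = l.headD 0 := by
  obtain ⟨h, t, rfl⟩ := List.exists_cons_of_ne_nil hl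
  simp

-- growing one key's contribution moves its new distance to the end, up to permutation
theorem pvFlatMap_grow (keys : List (List Int)) (f : List Int → List Int) (k : List Int) (d : Int)
    (hnd : keys.Nodup) (hk : k ∈ keys) :
    (keys.flatMap (fun k' => if k' = k then f k' ++ [d] else f k')).Perm
      (keys.flatMap f ++ [d]) := by
  induction keys with
  | nil => simp at hk
  | cons h t ih =>
    rcases List.nodup_cons.mp hnd with ⟨hht, hnt⟩
    by_cases hh : h = k
    · subst hh
      have ht : ∀ k' ∈ t, (if k' = h then f k' ++ [d] else f k') = f k' := by
        intro k' hk'; rw [if_neg]; intro e; exact hht (e ▸ hk')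
      rw [List.flatMap_cons, List.flatMap_cons, if_pos rfl, List.flatMap_congr ht]
      rw [List.append_assoc, List.append_assoc]
      exact List.Perm.append_left (f h) List.perm_append_comm
    · have hkt : k ∈ t := by
        rcases List.mem_cons.mp hk with e | h2
        · exact absurd e.symm hh
        · exact h2
      rw [List.flatMap_cons, List.flatMap_cons, if_neg hh, List.append_assoc]
      exact List.Perm.append_left (f h) (ih hnt hkt)

-- the main invariant: processing the remaining indices extends A's distances multiset by B's stream
theorem pvMain (encrypted_data : List Int) (sequence_length : Int) :
    ∀ (is : List Int) (D : PySem.Dict (List Int) (List Int)) (first : PySem.Dict (List Int) Int),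
    D.keys.Nodup →
    (∀ k ∈ D.keys, D.getD k [] ≠ []) →
    (∀ k, first.get? k = (D.get? k).map (fun rl => rl.reverse.headD 0)) →
    (pvDists (is.foldl (pvAStep encrypted_data sequence_length) D)).Perm
      (pvDists D ++ pvStream encrypted_data sequence_length first is) := by
  intro is
  induction is with
  | nil => intro D first _ _ _; simp [pvStream, List.Perm.refl]
  | cons i rest ih =>
    intro D first hnd hne hfirst
    rw [List.foldl_cons, pvStream]
    set k := pvKey encrypted_data sequence_length i with hk
    cases hD : D.get? k with
    | some l =>
      have hcont : D.contains k = true := by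
        rw [PySem.Dict.contains_eq_isSome_get?, hD]; rfl
      have hkmem : k ∈ D.keys := (PySem.Dict.contains_iff_mem_keys D k).mp hcont
      have hgetD : D.getD k [] = l := by rw [PySem.Dict.getD_eq_get?_getD, hD]; rfl
      have hlne : l ≠ [] := hgetD ▸ hne k hkmem
      have hrne : l.reverse ≠ [] := by simpa using hlne
      have hstep : pvAStep encrypted_data sequence_length D i = D.insert k (i :: l) := by
        rw [pvAStep, ← hk, hD]
      set D' := D.insert k (i :: l) with hD'
      have hkeys' : D'.keys = D.keys := PySem.Dict.keys_insert_of_contains D (i :: l) hcont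
      have hnd' : D'.keys.Nodup := PySem.Dict.nodup_keys_insert D k (i :: l) hnd
      have hgetD' : ∀ k', D'.getD k' [] = if k' = k then i :: l else D.getD k' [] := by
        intro k'; exact PySem.Dict.getD_insert D k k' (i :: l) []
      have hne' : ∀ k' ∈ D'.keys, D'.getD k' [] ≠ [] := by
        intro k' hk'
        rw [hgetD' k']
        split_ifs with e
        · simp
        · exact hne k' (hkeys' ▸ hk')
      have hfirst' : ∀ k', first.get? k' = (D'.get? k').map (fun rl => rl.reverse.headD 0) := by
        intro k'
        rw [hfirst k', PySem.Dict.get?_insert D k k' (i :: l)]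
        split_ifs with e
        · subst e; rw [hD]
          simp only [Option.map_some, List.reverse_cons]
          rw [pvHeadD_append l.reverse i hrne]
        · rfl
      have hperm' : (pvDists D').Perm (pvDists D ++ [i - l.reverse.headD 0]) := by
        have : pvDists D' = D.keys.flatMap
            (fun k' => if k' = k then pvTD ((D.getD k' []).reverse) ++ [i - l.reverse.headD 0]
                       else pvTD ((D.getD k' []).reverse)) := by
          rw [pvDists, hkeys']
          apply List.flatMap_congr
          intro k' _
          rw [hgetD' k']
          split_ifs with e
          · subst e
            rw [hgetD, List.reverse_cons, pvTD_append l.reverse i hrne]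
          · rfl
        rw [this]
        exact pvFlatMap_grow D.keys _ k _ hnd hkmem
      have hf0 : first.get? k = some (l.reverse.headD 0) := by rw [hfirst k, hD]; rfl
      rw [hstep, hf0]
      have hIH := ih D' first hnd' hne' hfirst'
      refine hIH.trans ?_
      have := hperm'.append_right (pvStream encrypted_data sequence_length first rest)
      refine this.trans ?_
      rw [List.append_assoc]
      rfl
    | none =>
      have hcont : D.contains k = false := by
        rw [PySem.Dict.contains_eq_isSome_get?, hD]; rfl
      have hknmem : k ∉ D.keys := by
        intro hm
        rw [(PySem.Dict.contains_iff_mem_keys D k).mpr hm] at hcont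
        simp at hcont
      have hstep : pvAStep encrypted_data sequence_length D i = D.insert k [i] := by
        rw [pvAStep, ← hk, hD]
      set D' := D.insert k [i] with hD'
      have hkeys' : D'.keys = D.keys ++ [k] := PySem.Dict.keys_insert_of_not_contains D [i] hcont
      have hnd' : D'.keys.Nodup := PySem.Dict.nodup_keys_insert D k [i] hnd
      have hgetD' : ∀ k', D'.getD k' [] = if k' = k then [i] else D.getD k' [] := by
        intro k'; exact PySem.Dict.getD_insert D k k' [i] []
      have hne' : ∀ k' ∈ D'.keys, D'.getD k' [] ≠ [] := by
        intro k' hk'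
        rw [hgetD' k']
        split_ifs with e
        · simp
        · rw [hkeys'] at hk'
          rcases List.mem_append.mp hk' with h1 | h2
          · exact hne k' h1
          · exact absurd (List.mem_singleton.mp h2) e
      have hfirst' : ∀ k', (first.insert k i).get? k' = (D'.get? k').map (fun rl => rl.reverse.headD 0) := by
        intro k'
        rw [PySem.Dict.get?_insert first k k' i, PySem.Dict.get?_insert D k k' [i]]
        split_ifs with e
        · rfl
        · exact hfirst k'
      have hdists' : pvDists D' = pvDists D := by
        rw [pvDists, hkeys', List.flatMap_append]
        have h2 : [k].flatMap (fun k' => pvTD ((D'.getD k' []).reverse)) = [] := by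
          simp [hgetD', pvTD]
        rw [h2, List.append_nil, pvDists]
        apply List.flatMap_congr
        intro k' hk'
        rw [hgetD' k']
        rw [if_neg]
        intro e; exact hknmem (e ▸ hk')
      have hf0 : first.get? k = none := by rw [hfirst k, hD]; rfl
      rw [hstep, hf0]
      have hIH := ih D' (first.insert k i) hnd' hne' hfirst'
      rw [hdists'] at hIH
      exact hIH

-- the final dict of A's first loop has unique keys and nonempty position lists
theorem pvFoldInv (encrypted_data : List Int) (sequence_length : Int) :
    ∀ (is : List Int) (D : PySem.Dict (List Int) (List Int)),
    D.keys.Nodup → (∀ k ∈ D.keys, D.getD k [] ≠ []) →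
    (is.foldl (pvAStep encrypted_data sequence_length) D).keys.Nodup ∧
      ∀ k ∈ (is.foldl (pvAStep encrypted_data sequence_length) D).keys,
        (is.foldl (pvAStep encrypted_data sequence_length) D).getD k [] ≠ [] := by
  intro is
  induction is with
  | nil => intro D hnd hne; exact ⟨hnd, hne⟩
  | cons i rest ih =>
    intro D hnd hne
    rw [List.foldl_cons]
    set k := pvKey encrypted_data sequence_length i with hk
    have step_insert : ∃ v : List Int, v ≠ [] ∧
        pvAStep encrypted_data sequence_length D i = D.insert k v := by
      rw [pvAStep, ← hk]
      cases hD : D.get? k with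
      | some l => exact ⟨i :: l, by simp, rfl⟩
      | none => exact ⟨[i], by simp, rfl⟩
    obtain ⟨v, hv, hstep⟩ := step_insert
    rw [hstep]
    apply ih
    · exact PySem.Dict.nodup_keys_insert D k v hnd
    · intro k' hk'
      rw [PySem.Dict.getD_insert D k k' v []]
      split_ifs with e
      · exact hv
      · by_cases hc : D.contains k = true
        · rw [PySem.Dict.keys_insert_of_contains D v hc] at hk'
          exact hne k' hk'
        · have hc' : D.contains k = false := by
            cases h : D.contains k
            · rfl
            · exact absurd h hc
          rw [PySem.Dict.keys_insert_of_not_contains D v hc'] at hk'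
          rcases List.mem_append.mp hk' with h1 | h2
          · exact hne k' h1
          · exact absurd (List.mem_singleton.mp h2) e

-- A's final match over the distances list is the pvF-fold from none
theorem pvMatchFold (ds : List Int) :
    (match ds with
     | [] => (none : Option Int)
     | d0 :: rest => some (pvGcdLoop d0 rest)) = ds.foldl pvF none := by
  cases ds with
  | nil => rfl
  | cons d0 rest =>
    have : pvF none d0 = some d0 := rfl
    simp only [List.foldl_cons, this, pvFoldF_some rest d0, pvGcdLoop_eq_foldl rest d0]

-- ===== VERDICT (by name: the statement is the Claim_ definition above) =====
theorem kasiski_spec : Claim_equal_kasiski := by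
  intro encrypted_data sequence_length _
  show kasiski encrypted_data sequence_length = kasiski_alt encrypted_data sequence_length
  rw [kasiski, kasiski_alt]
  set is := PySem.List.pyRange 0 (PySem.List.len encrypted_data - sequence_length) 1 with his
  obtain ⟨hnd, _hne⟩ := pvFoldInv encrypted_data sequence_length is PySem.Dict.empty
    (by rw [PySem.Dict.keys_empty]; exact List.nodup_nil)
    (by rw [PySem.Dict.keys_empty]; intro k hk; simp at hk)
  have hperm : (pvDists (is.foldl (pvAStep encrypted_data sequence_length) PySem.Dict.empty)).Perm
      (pvStream encrypted_data sequence_length PySem.Dict.empty is) := by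
    have := pvMain encrypted_data sequence_length is PySem.Dict.empty PySem.Dict.empty
      (by rw [PySem.Dict.keys_empty]; exact List.nodup_nil)
      (by rw [PySem.Dict.keys_empty]; intro k hk; simp at hk)
      (by intro k; rw [PySem.Dict.get?_empty, PySem.Dict.get?_empty]; rfl)
    have hnil : pvDists (PySem.Dict.empty : PySem.Dict (List Int) (List Int)) = [] := by
      rw [pvDists, PySem.Dict.keys_empty]; rfl
    rw [hnil, List.nil_append] at this
    exact this
  rw [pvDistPhase _ hnd, List.reverse_reverse, pvMatchFold]
  rw [@List.Perm.foldl_eq _ _ pvF _ _ ⟨pvF_rightComm⟩ hperm none]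
  rw [pvBLoop_eq_foldl]
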